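-- pv_equiv track=rewrite | github.com/oboard/knit-mcp | server.py | _lace_mesh
-- ===== SOURCE A (Python) =====
-- from typing import List, Dict, Union, TypedDict
--
-- def _lace_mesh(width: int, height: int) -> List[List[str]]:
--     # 简单网眼：第1行重复 YO, K2tog；第2行全下针，循环
--     grid = []
--     for r in range(height):
--         row = []
--         if r % 2 == 0:
--             i = 0
--             while i < width:
--                 row.append("YO")
--                 if i + 1 < width:
--                     row.append("K2tog")
--                 i += 2
--             # 若宽为奇数，最后一个用 K 补齐
--             if len(row) < width:
--                 row.append("K")
--             row = row[:width]
--         else: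
--             row = ["K" for _ in range(width)]
--         grid.append(row)
--     return grid
-- ===== SOURCE B (Python) =====
-- from typing import List
--
-- def _lace_mesh(width: int, height: int) -> List[List[str]]:
--     # Tile-and-truncate: build the two template rows once by repeating short
--     # motifs, then repeat the two-row pattern vertically and cut to size.
--     if height <= 0:
--         return []
--     lace = (["YO", "K2tog"] * ((width + 1) // 2))[:width]
--     plain = ["K"] * width
--     return ([lace, plain] * ((height + 1) // 2))[:height]
-- ===== Notes on version B (the rewrite author's own statement) =====
-- stated objective: simpler
-- what changed: Tile-and-truncate: the lace row is built once by repeating the two-stitch motif and slicing to width, the plain row by list repetition, and the grid by repeating the two-row pattern and slicing to height, replacing A's per-row branching and per-cell pair-stepping while-loop.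
import Mathlib
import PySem

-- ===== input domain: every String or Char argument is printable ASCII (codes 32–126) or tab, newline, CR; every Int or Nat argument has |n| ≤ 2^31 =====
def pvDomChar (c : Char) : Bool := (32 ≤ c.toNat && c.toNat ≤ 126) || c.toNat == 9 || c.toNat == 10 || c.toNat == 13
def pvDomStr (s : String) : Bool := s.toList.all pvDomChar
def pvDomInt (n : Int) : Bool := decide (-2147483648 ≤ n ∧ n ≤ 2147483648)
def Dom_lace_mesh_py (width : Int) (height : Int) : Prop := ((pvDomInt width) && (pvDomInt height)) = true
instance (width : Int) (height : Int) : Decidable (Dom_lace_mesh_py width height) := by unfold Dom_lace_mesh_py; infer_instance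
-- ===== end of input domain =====

-- B builds the two template rows once by repeating short motifs and truncating,
-- then repeats the two-row pattern vertically and cuts to height (tile-and-truncate,
-- no per-cell or per-row loop); objective: simpler. Return values proved equal.

-- ===== PORT A =====
-- the 'while i < width' loop of A, accumulating 'row'
def laceRowLoop (width : Int) (i : Int) (row : List String) : List String :=
  if _h : i < width then
    laceRowLoop width (i + 2)
      (if i + 1 < width then row ++ ["YO"] ++ ["K2tog"] else row ++ ["YO"])
  else row
termination_by (width - i).toNat
decreasing_by omega

def lace_mesh_py (width : Int) (height : Int) : List (List String) :=
  (PySem.List.pyRange 0 height 1).foldl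
    (fun grid r =>
      let row :=
        if r % 2 = 0 then
          let row := laceRowLoop width 0 []
          let row := if (row.length : Int) < width then row ++ ["K"] else row
          PySem.List.slice row none (some width)
        else
          (List.range width.toNat).map (fun _ => "K")
      grid ++ [row]) []

-- ===== PORT B =====
def lace_mesh_py_alt (width : Int) (height : Int) : List (List String) :=
  if height ≤ 0 then [] else
  let lace := PySem.List.slice
      (PySem.List.pyRepeat ["YO", "K2tog"] (PySem.Int.floordiv (width + 1) 2)) none (some width)
  let plain := PySem.List.pyRepeat ["K"] width
  PySem.List.slice
      (PySem.List.pyRepeat [lace, plain] (PySem.Int.floordiv (height + 1) 2)) none (some height)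

-- ===== PRECONDITION & SPEC =====
def Spec_lace_mesh_py (width : Int) (height : Int) (out : List (List String)) : Prop := out = lace_mesh_py_alt width height
instance (width : Int) (height : Int) (out : List (List String)) : Decidable (Spec_lace_mesh_py width height out) := by unfold Spec_lace_mesh_py; infer_instance

-- ===== CLAIM (what is proved, stated in full; the proofs are below) =====
def Claim_equal_lace_mesh_py : Prop := ∀ (width : Int) (height : Int), Dom_lace_mesh_py width height → Spec_lace_mesh_py width height (lace_mesh_py width height)

-- ===== LEMMAS AND PROOFS =====

-- flattening k copies of a two-element motif is the parity pattern on 2k indices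
theorem flatten_replicate_pair {α : Type} (k : Nat) (a b : α) :
    (List.replicate k [a, b]).flatten =
      (List.range (2 * k)).map (fun i => if i % 2 = 0 then a else b) := by
  induction k with
  | zero => simp
  | succ k ih =>
    rw [List.replicate_succ', List.flatten_append, ih,
      show 2 * (k + 1) = 2 * k + 1 + 1 from by ring, List.range_succ, List.range_succ]
    simp [Nat.add_mod]

-- tile-and-truncate equals the parity comprehension over range n
theorem tile_slice {α : Type} (a b : α) (n : Int) :
    PySem.List.slice (PySem.List.pyRepeat [a, b] (PySem.Int.floordiv (n + 1) 2)) none (some n) =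
      (PySem.List.pyRange 0 n 1).map (fun i => if i % 2 = 0 then a else b) := by
  by_cases hn : 0 ≤ n
  · rw [PySem.List.slice_to _ hn]
    unfold PySem.List.pyRepeat PySem.Int.floordiv
    rw [flatten_replicate_pair, ← List.map_take, List.take_range, PySem.List.pyRange_one,
      List.map_map, Nat.min_eq_left (by rw [Int.fdiv_eq_ediv]; omega)]
    simp only [sub_zero]
    refine List.map_congr_left (fun k _ => ?_)
    simp only [Function.comp_apply, zero_add]
    by_cases hk : k % 2 = 0
    · rw [if_pos hk, if_pos (by omega)]
    · rw [if_neg hk, if_neg (by omega)]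
  · rw [PySem.List.pyRange_one_eq_nil (by omega)]
    unfold PySem.List.pyRepeat PySem.Int.floordiv
    rw [show ((n + 1).fdiv 2).toNat = 0 from by rw [Int.fdiv_eq_ediv]; omega]
    simp [PySem.List.slice]

-- the while-loop equals the parity comprehension over the remaining range, given i even
theorem laceRowLoop_eq (width : Int) (i : Int) (row : List String) (hi : i % 2 = 0) :
    laceRowLoop width i row =
      row ++ (PySem.List.pyRange i width 1).map (fun c => if c % 2 = 0 then "YO" else "K2tog") := by
  by_cases h : i < width
  · rw [laceRowLoop, dif_pos h, laceRowLoop_eq width (i + 2) _ (by omega)]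
    by_cases h2 : i + 1 < width
    · rw [if_pos h2, PySem.List.pyRange_one_cons h, PySem.List.pyRange_one_cons h2,
        show i + 1 + 1 = i + 2 from by ring]
      simp only [List.map_cons]
      rw [if_pos hi, if_neg (by omega)]
      simp
    · rw [if_neg h2, PySem.List.pyRange_one_cons h,
        PySem.List.pyRange_one_eq_nil (a := i + 1) (b := width) (by omega)]
      simp only [List.map_cons, List.map_nil]
      rw [if_pos hi]
      simp [PySem.List.pyRange_one_eq_nil (a := i + 2) (b := width) (by omega)]
  · rw [laceRowLoop, dif_neg h, PySem.List.pyRange_one_eq_nil (by omega)]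
    simp
termination_by (width - i).toNat
decreasing_by omega

-- A's even-row computation (loop, fill branch, slice) equals the parity comprehension
theorem laceEvenRow_eq (width : Int) :
    PySem.List.slice
      (if ((laceRowLoop width 0 []).length : Int) < width
        then laceRowLoop width 0 [] ++ ["K"] else laceRowLoop width 0 [])
      none (some width) =
      (PySem.List.pyRange 0 width 1).map (fun c => if c % 2 = 0 then "YO" else "K2tog") := by
  rw [laceRowLoop_eq width 0 [] (by decide)]
  simp only [List.nil_append]
  have hlen : ((PySem.List.pyRange 0 width 1).map
      (fun c => if c % 2 = 0 then "YO" else "K2tog")).length = width.toNat := by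
    simp [PySem.List.length_pyRange_one]
  rw [if_neg (by rw [hlen]; omega)]
  by_cases hw : 0 ≤ width
  · rw [PySem.List.slice_to _ hw, List.take_of_length_le (by rw [hlen])]
  · rw [PySem.List.pyRange_one_eq_nil (by omega)]
    simp [PySem.List.slice]

-- ===== VERDICT (by name: the statement is the Claim_ definition above) =====
theorem lace_mesh_py_spec : Claim_equal_lace_mesh_py := by
  intro width height _
  unfold Spec_lace_mesh_py lace_mesh_py lace_mesh_py_alt
  simp only []
  by_cases hh : height ≤ 0
  · rw [if_pos hh, PySem.List.pyRange_one_eq_nil (by omega)]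
    simp
  rw [if_neg hh, tile_slice, tile_slice]
  have h : ∀ (grid : List (List String)), ∀ r ∈ PySem.List.pyRange 0 height 1,
      grid ++ [if r % 2 = 0 then
          PySem.List.slice
            (if ((laceRowLoop width 0 []).length : Int) < width
              then laceRowLoop width 0 [] ++ ["K"] else laceRowLoop width 0 [])
            none (some width)
        else (List.range width.toNat).map (fun _ => "K")] =
      grid ++ [(fun r => if r % 2 = 0 then
          (PySem.List.pyRange 0 width 1).map (fun c => if c % 2 = 0 then "YO" else "K2tog")
        else PySem.List.pyRepeat ["K"] width) r] := by
    intro grid r _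
    by_cases hr : r % 2 = 0
    · simp only [if_pos hr, laceEvenRow_eq]
    · simp only [if_neg hr]
      rw [PySem.List.pyRepeat_singleton]
      simp
  rw [PySem.List.foldl_congr_mem
        (l := PySem.List.pyRange 0 height 1) (init := [])
        (f := fun grid r =>
          grid ++ [if r % 2 = 0 then
              PySem.List.slice
                (if ((laceRowLoop width 0 []).length : Int) < width
                  then laceRowLoop width 0 [] ++ ["K"] else laceRowLoop width 0 [])
                none (some width)
            else (List.range width.toNat).map (fun _ => "K")])
        (g := fun grid r =>
          grid ++ [(fun r => if r % 2 = 0 then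
              (PySem.List.pyRange 0 width 1).map (fun c => if c % 2 = 0 then "YO" else "K2tog")
            else PySem.List.pyRepeat ["K"] width) r]) h,
      PySem.List.foldl_append_singleton_eq_map]
  simp
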